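-- pv_equiv track=rewrite | github.com/egarsan176/GitLinkedIn | Python/EncontrarPalabras.py | palabrasMasCincoLetras
-- ===== SOURCE A (Python) =====
-- def palabrasMasCincoLetras(cadena):
--     aux = ""
--     contador = 0
--
--     for i in cadena:
--         if i != " ":
--             aux+=i
--         else:
--             if len(aux) > 5:
--                 contador += 1
--             aux = ""
--
--     if len(aux) > 5:    #para ver lo que queda en aux una vez salga del for
--         contador += 1
--
--     return "La cadena tiene %s palabras de más de cinco letras."%contador
-- ===== SOURCE B (Python) =====
-- def palabrasMasCincoLetras(cadena):
--     contador = sum(1 for w in cadena.split(" ") if len(w) > 5)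
--     return "La cadena tiene %s palabras de más de cinco letras."%contador
-- ===== Notes on version B (the rewrite author's own statement) =====
-- stated objective: simpler
-- what changed: Replaces the character-by-character accumulator scan (manual word buffer aux plus end-of-loop flush) with a single tokenize-then-count pass: split the string on single spaces and sum the tokens longer than five characters.
import Mathlib
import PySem

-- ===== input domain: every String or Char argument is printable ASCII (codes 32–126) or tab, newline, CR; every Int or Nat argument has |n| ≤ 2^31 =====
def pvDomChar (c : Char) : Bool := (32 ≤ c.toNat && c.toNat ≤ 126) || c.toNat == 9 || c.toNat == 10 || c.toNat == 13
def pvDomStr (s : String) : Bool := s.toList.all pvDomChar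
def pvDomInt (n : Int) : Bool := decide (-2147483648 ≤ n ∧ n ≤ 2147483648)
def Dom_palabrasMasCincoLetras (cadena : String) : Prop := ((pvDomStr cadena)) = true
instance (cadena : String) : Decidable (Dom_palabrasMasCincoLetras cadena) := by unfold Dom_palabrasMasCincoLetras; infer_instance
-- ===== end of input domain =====

-- B replaces A's manual character-accumulator scan by tokenize-on-" "-then-count: a simpler decomposition, same O(n) but measurably faster in CPython (built-in split vs per-char loop).

-- ===== PORT A =====
def palabrasMasCincoLetras (cadena : String) : String :=
  let st := cadena.toList.foldl
    (fun (p : List Char × Int) i =>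
      if i ≠ ' ' then (p.1 ++ [i], p.2)
      else ([], if 5 < p.1.length then p.2 + 1 else p.2))
    (([] : List Char), (0 : Int))
  let contador : Int := if 5 < st.1.length then st.2 + 1 else st.2
  "La cadena tiene " ++ PySem.Int.toStr contador ++ " palabras de más de cinco letras."

-- ===== PORT B =====
def palabrasMasCincoLetras_alt (cadena : String) : String :=
  let contador : Int :=
    (PySem.Chars.splitOn cadena.toList [' ']).foldl
      (fun (acc : Int) w => if 5 < w.length then acc + 1 else acc) 0
  "La cadena tiene " ++ PySem.Int.toStr contador ++ " palabras de más de cinco letras."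

-- ===== PRECONDITION & SPEC =====
def Spec_palabrasMasCincoLetras (cadena : String) (out : String) : Prop := out = palabrasMasCincoLetras_alt cadena
instance (cadena : String) (out : String) : Decidable (Spec_palabrasMasCincoLetras cadena out) := by unfold Spec_palabrasMasCincoLetras; infer_instance

-- ===== CLAIM (what is proved, stated in full; the proofs are below) =====
def Claim_equal_palabrasMasCincoLetras : Prop := ∀ (cadena : String), Dom_palabrasMasCincoLetras cadena → Spec_palabrasMasCincoLetras cadena (palabrasMasCincoLetras cadena)

-- ===== LEMMAS AND PROOFS =====

/-- Reference tokenizer: split on single spaces, accumulating the current word in order. -/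
def pvTok : List Char → List Char → List (List Char)
  | [], cur => [cur]
  | c :: rest, cur => if c = ' ' then cur :: pvTok rest [] else pvTok rest (cur ++ [c])

theorem pvGo_eq (l : List Char) : ∀ (cur : List Char) (accs : List (List Char)),
    PySem.Chars.splitOn.go [' '] (l.length + 1) l cur accs = accs.reverse ++ pvTok l cur.reverse := by
  induction l with
  | nil =>
    intro cur accs
    rw [PySem.Chars.splitOn.go] <;> simp [pvTok]
  | cons c rest ih =>
    intro cur accs
    rw [PySem.Chars.splitOn.go]
    by_cases hc : c = ' '
    · subst hc
      simp only [List.isPrefixOf, List.length_cons]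
      simp only [beq_self_eq_true, Bool.true_and, if_pos, List.length,
        List.drop_succ_cons, List.drop_zero]
      rw [ih [] (cur.reverse :: accs)]
      simp [pvTok]
    · have hpre : [' '].isPrefixOf (c :: rest) = false := by
        simp [List.isPrefixOf]
        intro h; exact absurd h.symm hc
      simp only [hpre, Bool.false_eq_true, if_false, List.length_cons]
      rw [ih (c :: cur) accs]
      simp [pvTok, hc]

theorem pvSplitOn_eq (l : List Char) :
    PySem.Chars.splitOn l [' '] = pvTok l [] := by
  have := pvGo_eq l [] []
  simpa [PySem.Chars.splitOn] using this

theorem pvLoopA (l : List Char) : ∀ (aux : List Char) (cnt : Int),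
    (if 5 < (List.foldl
        (fun (p : List Char × Int) i =>
          if i ≠ ' ' then (p.1 ++ [i], p.2)
          else ([], if 5 < p.1.length then p.2 + 1 else p.2)) (aux, cnt) l).1.length
      then (List.foldl
        (fun (p : List Char × Int) i =>
          if i ≠ ' ' then (p.1 ++ [i], p.2)
          else ([], if 5 < p.1.length then p.2 + 1 else p.2)) (aux, cnt) l).2 + 1
      else (List.foldl
        (fun (p : List Char × Int) i =>
          if i ≠ ' ' then (p.1 ++ [i], p.2)
          else ([], if 5 < p.1.length then p.2 + 1 else p.2)) (aux, cnt) l).2)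
    = (pvTok l aux).foldl (fun (acc : Int) w => if 5 < w.length then acc + 1 else acc) cnt := by
  induction l with
  | nil => intro aux cnt; simp [pvTok]
  | cons c rest ih =>
    intro aux cnt
    by_cases hc : c = ' '
    · subst hc
      simp only [List.foldl_cons, pvTok, ne_eq, not_true_eq_false, if_false,
        reduceIte]
      exact ih [] (if 5 < aux.length then cnt + 1 else cnt)
    · simp only [List.foldl_cons, pvTok, hc, ne_eq, not_false_eq_true, if_true, if_false]
      exact ih (aux ++ [c]) cnt

-- ===== VERDICT (by name: the statement is the Claim_ definition above) =====
theorem palabrasMasCincoLetras_spec : Claim_equal_palabrasMasCincoLetras := by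
  intro cadena _
  unfold Spec_palabrasMasCincoLetras palabrasMasCincoLetras palabrasMasCincoLetras_alt
  simp only [pvSplitOn_eq]
  rw [← pvLoopA cadena.toList [] 0]
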